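-- pv_equiv track=rewrite | github.com/public-arch/Marithmetics | DEMO-GRRA-MASTER_v3.py | mirror_residues
-- ===== SOURCE A (Python) =====
-- from typing import Dict, List, Optional, Tuple
--
-- def mirror_residues(q: int, R: Tuple[int, ...]) -> Tuple[int, ...]:
--     out = []
--     for r in R:
--         rr = (q - r) % q
--         if rr == 0:
--             rr = q
--         if rr == q:
--             rr = q - 1
--         out.append(rr)
--     out = sorted(set(out))
--     if len(out) < len(R):
--         need = len(R) - len(out)
--         for cand in range(1, q):
--             if cand not in out:
--                 out.append(cand)
--                 need -= 1
--                 if need == 0: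
--                     break
--         out.sort()
--     return tuple(out)
-- ===== SOURCE B (Python) =====
-- def mirror_residues(q, R):
--     # one comparison sort of the residue multiset, then a linear scan that
--     # dedupes adjacent duplicates, and a final linear "gap walk" that emits
--     # missing candidates arithmetically (no membership tests, no second sort)
--     res = sorted((q - r) % q or q - 1 for r in R)
--     uniq = []
--     for v in res:
--         if not uniq or v != uniq[-1]:
--             uniq.append(v)
--     need = len(res) - len(uniq)
--     out = []
--     c = 1
--     for v in uniq:
--         while need > 0 and c < min(v, q):
--             out.append(c)
--             c += 1
--             need -= 1
--         out.append(v)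
--         c = v + 1
--     while need > 0 and c < q:
--         out.append(c)
--         c += 1
--         need -= 1
--     return tuple(out)
-- ===== Notes on version B (the rewrite author's own statement) =====
-- stated objective: alternative
-- what changed: A dedupes via set(), sorts, then pads by scanning candidates with list-membership tests and re-sorts; B sorts the residue multiset once, dedupes adjacent duplicates in a linear scan, and emits the padded result in one linear gap-walk that generates missing candidates arithmetically from the gaps between consecutive residues -- no set, no membership tests, no second sort.
import Mathlib
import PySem

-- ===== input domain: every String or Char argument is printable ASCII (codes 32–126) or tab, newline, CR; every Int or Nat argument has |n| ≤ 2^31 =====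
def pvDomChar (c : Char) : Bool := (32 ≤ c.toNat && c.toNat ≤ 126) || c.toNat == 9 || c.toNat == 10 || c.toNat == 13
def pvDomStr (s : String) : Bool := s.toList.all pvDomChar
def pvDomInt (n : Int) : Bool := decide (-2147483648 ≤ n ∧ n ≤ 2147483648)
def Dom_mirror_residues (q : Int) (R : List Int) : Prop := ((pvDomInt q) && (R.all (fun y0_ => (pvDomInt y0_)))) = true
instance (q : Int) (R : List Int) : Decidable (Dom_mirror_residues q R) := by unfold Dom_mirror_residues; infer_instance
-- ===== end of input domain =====

-- B replaces A's set → sort → candidate scan with list-membership tests → resort by one sort of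
-- the residue multiset, a linear adjacent-duplicate dedupe, and a linear gap-walk that emits the
-- missing filler candidates arithmetically from the gaps between consecutive residues
-- (objective: alternative — no set, no membership tests, no second sort).

-- ===== PORT A =====
-- A's fill loop over range(1, q): iterates candidates in ascending order, stopping at the break
def pvLoopA (q : Int) (cand : Int) (s : List Int × Int × Bool) : List Int × Int × Bool :=
  if s.2.2 then s
  else if h : cand < q then
    pvLoopA q (cand + 1)
      (if cand ∈ s.1 then s else (s.1 ++ [cand], s.2.1 - 1, s.2.1 - 1 == 0))
  else s
termination_by (q - cand).toNat
decreasing_by omega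

def mirror_residues (q : Int) (R : List Int) : List Int :=
  let out := R.foldl (fun out r =>
    let rr := PySem.Int.mod (q - r) q
    let rr := if rr = 0 then q else rr
    let rr := if rr = q then q - 1 else rr
    out ++ [rr]) []
  let out := PySem.List.sorted (PySem.Set.ofList out) (fun x => x) false
  if out.length < R.length then
    let need : Int := (R.length : Int) - (out.length : Int)
    let s := pvLoopA q 1 (out, need, false)
    PySem.List.sorted s.1 (fun x => x) false
  else out

-- ===== PORT B =====
-- Source B's inner while loop: 'while need > 0 and c < bound: out.append(c); c += 1; need -= 1'
-- (returns the emitted candidates, the final c and the final need)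
def pvGap (bound c need : Int) : List Int × Int × Int :=
  if h : 0 < need ∧ c < bound then
    let t := pvGap bound (c + 1) (need - 1)
    (c :: t.1, t.2)
  else ([], c, need)
termination_by (bound - c).toNat
decreasing_by omega

-- Source B's 'for v in uniq' loop followed by the trailing while loop
def pvWalk (q : Int) : List Int → Int → Int → List Int
  | [], c, need => (pvGap q c need).1
  | v :: vs, c, need =>
    let g := pvGap (min v q) c need
    g.1 ++ v :: pvWalk q vs (v + 1) g.2.2

def mirror_residues_alt (q : Int) (R : List Int) : List Int :=
  -- '(q - r) % q or q - 1': the int m is falsy exactly when m = 0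
  let res := PySem.List.sorted (R.map (fun r =>
    let m := PySem.Int.mod (q - r) q
    if m = 0 then q - 1 else m)) (fun x => x) false
  -- 'if not uniq or v != uniq[-1]: uniq.append(v)'
  let uniq := res.foldl (fun u v =>
    if u.isEmpty ∨ PySem.List.pyGet? u (-1) ≠ some v then u ++ [v] else u) []
  pvWalk q uniq 1 ((res.length : Int) - (uniq.length : Int))

-- ===== PRECONDITION & SPEC =====
-- Pre_ excludes exactly the inputs where Python A raises ZeroDivisionError on `% q`:
-- q = 0 with a nonempty R (for R = [] the loop body never runs and A returns ()).
def Pre_mirror_residues (q : Int) (R : List Int) : Prop := q ≠ 0 ∨ R = []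
instance (q : Int) (R : List Int) : Decidable (Pre_mirror_residues q R) := by unfold Pre_mirror_residues; infer_instance
def pvWitness_mirror_residues : Int × List Int := (5, [1, 2, 2])

def Spec_mirror_residues (q : Int) (R : List Int) (out : List Int) : Prop := out = mirror_residues_alt q R
instance (q : Int) (R : List Int) (out : List Int) : Decidable (Spec_mirror_residues q R out) := by unfold Spec_mirror_residues; infer_instance

-- ===== CLAIM (what is proved, stated in full; the proofs are below) =====
def Claim_equal_mirror_residues : Prop := ∀ (q : Int) (R : List Int), Dom_mirror_residues q R → Pre_mirror_residues q R → Spec_mirror_residues q R (mirror_residues q R)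

-- ===== LEMMAS AND PROOFS =====

def pvRemap (q r : Int) : Int :=
  let m := PySem.Int.mod (q - r) q
  if m = 0 then q - 1 else m

lemma remap_chain_eq (q r : Int) (hq : q ≠ 0) :
    (if (if PySem.Int.mod (q - r) q = 0 then q else PySem.Int.mod (q - r) q) = q then q - 1
     else (if PySem.Int.mod (q - r) q = 0 then q else PySem.Int.mod (q - r) q)) = pvRemap q r := by
  unfold pvRemap
  have hmq : PySem.Int.mod (q - r) q ≠ q := by
    rcases lt_or_gt_of_ne hq with h | h
    · have := PySem.Int.mod_neg_bounds (a := q - r) h; omega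
    · have := PySem.Int.mod_lt (a := q - r) h; omega
  by_cases h0 : PySem.Int.mod (q - r) q = 0
  · simp [h0]
  · simp [h0, hmq]

lemma pairwise_lt_of_le_nodup (l : List Int)
    (h1 : l.Pairwise (· ≤ ·)) (h2 : l.Nodup) : l.Pairwise (· < ·) :=
  (h1.and h2).imp (fun h => lt_of_le_of_ne h.1 h.2)

-- ---------- A-side characterization ----------

lemma loopA_brk : ∀ (cs : List Int) (s : List Int × Int × Bool), s.2.2 = true →
    cs.foldl (fun (s : List Int × Int × Bool) cand =>
        if s.2.2 then s
        else if cand ∈ s.1 then s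
        else (s.1 ++ [cand], s.2.1 - 1, s.2.1 - 1 == 0)) s = s
  | [], _, _ => rfl
  | c :: cs, s, h => by
    rw [List.foldl_cons, if_pos h]
    exact loopA_brk cs s h

lemma loopA_char : ∀ (cs : List Int) (out : List Int) (n : Int), cs.Nodup → 0 < n →
    ((cs.foldl (fun (s : List Int × Int × Bool) cand =>
        if s.2.2 then s
        else if cand ∈ s.1 then s
        else (s.1 ++ [cand], s.2.1 - 1, s.2.1 - 1 == 0)) (out, n, false)).1
      = out ++ (cs.filter (fun c => decide (c ∉ out))).take n.toNat)
  | [], out, n, _, _ => by simp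
  | c :: cs, out, n, h, hn => by
    have hc : c ∉ cs := (List.nodup_cons.mp h).1
    have hcs : cs.Nodup := (List.nodup_cons.mp h).2
    rw [List.foldl_cons]
    by_cases hco : c ∈ out
    · rw [if_neg (by simp), if_pos hco]
      rw [loopA_char cs out n hcs hn]
      simp [hco]
    · rw [if_neg (by simp), if_neg hco]
      simp only
      by_cases h1 : n = 1
      · have hbeq : (n - 1 == 0) = true := by simp [h1]
        rw [hbeq, loopA_brk _ _ rfl]
        simp [hco, h1]
      · have hn1 : 0 < n - 1 := by omega
        have hbeq : (n - 1 == 0) = false := by simp; omega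
        rw [hbeq, loopA_char cs (out ++ [c]) (n - 1) hcs hn1]
        have hf : cs.filter (fun x => decide (x ∉ out ++ [c]))
            = cs.filter (fun x => decide (x ∉ out)) := by
          apply List.filter_congr; intro x hx
          have : x ≠ c := fun e => hc (e ▸ hx)
          simp [this]
        rw [hf]
        obtain ⟨m, hm⟩ : ∃ m, n.toNat = m + 1 := ⟨(n - 1).toNat, by omega⟩
        have hm1 : (n - 1).toNat = m := by omega
        simp [hco, hm, hm1]

lemma pvLoopA_eq_foldl (q : Int) (cand : Int) (s : List Int × Int × Bool) :
    pvLoopA q cand s = (PySem.List.pyRange cand q 1).foldl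
      (fun (s : List Int × Int × Bool) cand =>
        if s.2.2 then s
        else if cand ∈ s.1 then s
        else (s.1 ++ [cand], s.2.1 - 1, s.2.1 - 1 == 0)) s := by
  rw [pvLoopA]
  by_cases hb : s.2.2 = true
  · rw [if_pos hb, loopA_brk _ _ hb]
  · rw [if_neg hb]
    by_cases h : cand < q
    · rw [dif_pos h, PySem.List.pyRange_one_cons h, List.foldl_cons]
      rw [pvLoopA_eq_foldl q (cand + 1)]
      rw [if_neg hb]
    · rw [dif_neg h, PySem.List.pyRange_one_eq_nil (by omega)]
      rfl
termination_by (q - cand).toNat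
decreasing_by omega

def pvS (q : Int) (R : List Int) : List Int := PySem.Set.ofList (R.map (pvRemap q))

def pvM (q : Int) (R : List Int) : List Int :=
  pvS q R ++ ((PySem.List.pyRange 1 q 1).filter (fun c => !PySem.Set.contains (pvS q R) c)).take
      ((R.length : Int) - ((pvS q R).length : Int)).toNat

lemma A_char (q : Int) (R : List Int) (hq : q ≠ 0) :
    mirror_residues q R = PySem.List.sorted (pvM q R) (fun x => x) false := by
  unfold mirror_residues
  simp only [PySem.List.foldl_append_singleton_eq_map, List.nil_append, remap_chain_eq, ne_eq,
    hq, not_false_iff]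
  rw [show PySem.Set.ofList (R.map (pvRemap q)) = pvS q R from rfl]
  by_cases hlen : (PySem.List.sorted (pvS q R) (fun x => x) false).length < R.length
  · rw [if_pos hlen]
    have hlen' := PySem.List.length_sorted (pvS q R) (fun x => x) false
    have hn : (0 : Int) < (R.length : Int) - ((PySem.List.sorted (pvS q R) (fun x => x) false).length : Int) := by
      omega
    rw [pvLoopA_eq_foldl, loopA_char _ _ _ (PySem.List.nodup_pyRange_one 1 q) hn]
    have hfc : (PySem.List.pyRange 1 q 1).filter
          (fun c => decide (c ∉ PySem.List.sorted (pvS q R) (fun x => x) false))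
        = (PySem.List.pyRange 1 q 1).filter (fun c => !PySem.Set.contains (pvS q R) c) := by
      apply List.filter_congr; intro x _
      rw [PySem.Set.contains_eq_decide]
      simp [PySem.List.mem_sorted]
    rw [hfc]
    apply PySem.List.sorted_eq_sorted_of_perm _ _ _ (fun a b h => h)
    unfold pvM
    rw [hlen']
    exact List.Perm.append_right _ (PySem.List.sorted_perm _ _ _)
  · rw [if_neg hlen]
    have hlen' := PySem.List.length_sorted (pvS q R) (fun x => x) false
    have h0 : ((R.length : Int) - ((pvS q R).length : Int)).toNat = 0 := by omega
    rw [show pvM q R = pvS q R by unfold pvM; rw [h0]; simp]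

-- ---------- B-side: the adjacent-duplicate dedupe of the sorted list is sorted(set) ----------

lemma mem_le_getLast : ∀ (xs : List Int) (h : xs ≠ []), xs.Pairwise (· < ·) →
    ∀ a ∈ xs, a ≤ xs.getLast h
  | [x], _, _, a, ha => by simp_all
  | x :: y :: t, _, hp, a, ha => by
    rw [List.getLast_cons (by simp)]
    rcases List.mem_cons.mp ha with rfl | ha
    · have hx : a < (y :: t).getLast (by simp) :=
        (List.pairwise_cons.mp hp).1 _ (List.getLast_mem _)
      omega
    · exact mem_le_getLast (y :: t) (by simp) (List.pairwise_cons.mp hp).2 a ha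

lemma dedup_fold : ∀ (l acc : List Int), acc.Pairwise (· < ·) → l.Pairwise (· ≤ ·) →
    (∀ a ∈ acc, ∀ x ∈ l, a ≤ x) →
    (l.foldl (fun u v =>
        if u.isEmpty ∨ PySem.List.pyGet? u (-1) ≠ some v then u ++ [v] else u) acc).Pairwise (· < ·)
    ∧ ∀ x, (x ∈ l.foldl (fun u v =>
        if u.isEmpty ∨ PySem.List.pyGet? u (-1) ≠ some v then u ++ [v] else u) acc ↔ x ∈ acc ∨ x ∈ l)
  | [], acc, hacc, _, _ => ⟨hacc, by simp⟩
  | v :: l, acc, hacc, hl, hle => by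
    rw [List.foldl_cons]
    have hll : l.Pairwise (· ≤ ·) := (List.pairwise_cons.mp hl).2
    have hvl : ∀ x ∈ l, v ≤ x := (List.pairwise_cons.mp hl).1
    by_cases he : acc = []
    · subst he
      have : (([] : List Int).isEmpty ∨ PySem.List.pyGet? ([] : List Int) (-1) ≠ some v) := by simp
      rw [if_pos this, List.nil_append]
      obtain ⟨h1, h2⟩ := dedup_fold l [v] (by simp) hll (by simpa using hvl)
      refine ⟨h1, fun x => ?_⟩
      rw [h2 x]; simp
    · have hlast : PySem.List.pyGet? acc (-1) = some (acc.getLast he) := by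
        rw [PySem.List.pyGet?_neg_one, List.getLast?_eq_some_getLast he]
      by_cases hv : acc.getLast he = v
      · have : ¬ (acc.isEmpty ∨ PySem.List.pyGet? acc (-1) ≠ some v) := by
          simp [hlast, hv, he]
        rw [if_neg this]
        obtain ⟨h1, h2⟩ := dedup_fold l acc hacc hll
          (fun a ha x hx => le_trans (hle a ha v (by simp)) (hvl x hx))
        refine ⟨h1, fun x => ?_⟩
        rw [h2 x]
        constructor
        · rintro (h | h)
          · exact Or.inl h
          · exact Or.inr (List.mem_cons_of_mem _ h)
        · rintro (h | h)
          · exact Or.inl h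
          · rcases List.mem_cons.mp h with rfl | h
            · exact Or.inl (hv ▸ List.getLast_mem he)
            · exact Or.inr h
      · have : (acc.isEmpty ∨ PySem.List.pyGet? acc (-1) ≠ some v) := by
          simp [hlast, hv]
        rw [if_pos this]
        have haccv : (acc ++ [v]).Pairwise (· < ·) := by
          rw [List.pairwise_append]
          refine ⟨hacc, by simp, fun a ha b hb => ?_⟩
          rw [List.mem_singleton.mp hb]
          have h1 : a ≤ acc.getLast he := mem_le_getLast acc he hacc a ha
          have h2 : acc.getLast he ≤ v := hle _ (List.getLast_mem he) v (by simp)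
          rcases eq_or_ne a (acc.getLast he) with rfl | hne
          · omega
          · have := lt_of_le_of_ne h1 hne; omega
        obtain ⟨h1, h2⟩ := dedup_fold l (acc ++ [v]) haccv hll
          (by
            intro a ha x hx
            rcases List.mem_append.mp ha with h | h
            · exact le_trans (hle a h v (by simp)) (hvl x hx)
            · rw [List.mem_singleton.mp h]; exact hvl x hx)
        refine ⟨h1, fun x => ?_⟩
        rw [h2 x]; simp; tauto

-- the deduped list IS sorted(pvS)
lemma dedup_eq_sorted_set (q : Int) (R : List Int) :
    ((PySem.List.sorted (R.map (pvRemap q)) (fun x => x) false).foldl (fun u v =>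
        if u.isEmpty ∨ PySem.List.pyGet? u (-1) ≠ some v then u ++ [v] else u) [])
      = PySem.List.sorted (pvS q R) (fun x => x) false := by
  set res := PySem.List.sorted (R.map (pvRemap q)) (fun x => x) false with hres
  obtain ⟨h1, h2⟩ := dedup_fold res [] (by simp)
    (PySem.List.sorted_pairwise (R.map (pvRemap q)) (fun x => x)) (by simp)
  set D := res.foldl (fun u v =>
    if u.isEmpty ∨ PySem.List.pyGet? u (-1) ≠ some v then u ++ [v] else u) [] with hD
  have hperm : D.Perm (pvS q R) := by
    have hDnod : D.Nodup := h1.imp (fun h => ne_of_lt h)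
    have hSnod : (pvS q R).Nodup := PySem.Set.nodup_ofList _
    rw [List.perm_ext_iff_of_nodup hDnod hSnod]
    intro x
    rw [h2 x]
    simp [hres, PySem.List.mem_sorted, pvS, PySem.Set.mem_ofList]
  exact (PySem.List.sorted_eq_of_perm_of_pairwise_lt _ _ _ hperm h1).symm

-- ---------- B-side: gap-walk characterization ----------

lemma gap_spec (b c need : Int) :
    (pvGap b c need).1 = (PySem.List.pyRange c b 1).take need.toNat
    ∧ (pvGap b c need).2.2 = need - ((PySem.List.pyRange c b 1).take need.toNat).length := by
  rw [pvGap]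
  by_cases h : 0 < need ∧ c < b
  · rw [dif_pos h]
    obtain ⟨ih1, ih2⟩ := gap_spec b (c + 1) (need - 1)
    obtain ⟨k, hk⟩ : ∃ k, need.toNat = k + 1 := ⟨(need - 1).toNat, by omega⟩
    have hk1 : (need - 1).toNat = k := by omega
    rw [PySem.List.pyRange_one_cons h.2, hk, List.take_succ_cons]
    constructor
    · simp only [ih1, hk1]
    · simp only [ih2, hk1, List.length_cons]
      omega
  · rw [dif_neg h]
    rcases not_and_or.mp h with h1 | h1
    · have : need.toNat = 0 := by omega
      simp [this]
    · rw [PySem.List.pyRange_one_eq_nil (by omega)]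
      simp
termination_by (b - c).toNat
decreasing_by omega

lemma gap_empty (b c need : Int) (h : b ≤ c) : pvGap b c need = ([], c, need) := by
  rw [pvGap, dif_neg (by omega)]

-- for q ≤ 1 there are no filler candidates at all: the walk returns its input
lemma walk_triv (q : Int) : ∀ (u : List Int) (c need : Int),
    (∀ v ∈ u, q ≤ v + 1) → q ≤ c → pvWalk q u c need = u
  | [], c, need, _, hc => by
    rw [pvWalk, gap_empty q c need hc]
  | v :: vs, c, need, hu, hc => by
    rw [pvWalk, gap_empty (min v q) c need (le_trans (min_le_right _ _) hc),
      walk_triv q vs (v + 1) need (fun x hx => hu x (by simp [hx])) (hu v (by simp))]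
    rfl

-- the main characterization for q with candidates: the walk output is a permutation of
-- u ++ (the first `need` candidates of [c, q) not in u), and strictly increasing
lemma walk_spec (q : Int) : ∀ (u : List Int) (c need : Int),
    u.Pairwise (· < ·) → (∀ v ∈ u, c ≤ v ∧ v < q) → 0 ≤ need →
    (pvWalk q u c need).Perm
        (u ++ ((PySem.List.pyRange c q 1).filter (fun x => decide (x ∉ u))).take need.toNat)
    ∧ (pvWalk q u c need).Pairwise (· < ·)
  | [], c, need, _, _, _ => by
    rw [pvWalk, (gap_spec q c need).1]
    constructor
    · simp
    · exact ((PySem.List.pairwise_lt_pyRange_one c q).sublist (List.take_sublist _ _)).imp id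
  | v :: vs, c, need, hu, hb, hn => by
    have hcv : c ≤ v := (hb v (by simp)).1
    have hvq : v < q := (hb v (by simp)).2
    have hmin : min v q = v := min_eq_left (by omega)
    have hvvs : ∀ x ∈ vs, v < x := (List.pairwise_cons.mp hu).1
    have hvs : vs.Pairwise (· < ·) := (List.pairwise_cons.mp hu).2
    have hbvs : ∀ x ∈ vs, v + 1 ≤ x ∧ x < q :=
      fun x hx => ⟨by have := hvvs x hx; omega, (hb x (by simp [hx])).2⟩
    rw [pvWalk]
    simp only [hmin]
    set T1 := (PySem.List.pyRange c v 1).take need.toNat with hT1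
    have hg1 : (pvGap v c need).1 = T1 := (gap_spec v c need).1
    have hg2 : (pvGap v c need).2.2 = need - T1.length := by
      rw [(gap_spec v c need).2, hT1]
    have hT1len : T1.length ≤ need.toNat := by
      rw [hT1]; exact le_trans (List.length_take_le _ _) (le_refl _)
    have hn' : 0 ≤ need - (T1.length : Int) := by omega
    obtain ⟨ihp, ihs⟩ := walk_spec q vs (v + 1) (need - T1.length) hvs hbvs hn'
    -- decompose the candidate range at v
    have hsplit : PySem.List.pyRange c q 1
        = PySem.List.pyRange c v 1 ++ v :: PySem.List.pyRange (v + 1) q 1 := by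
      rw [PySem.List.pyRange_one_append c v q (by omega) (by omega),
        PySem.List.pyRange_one_cons hvq]
    have hfilt : (PySem.List.pyRange c q 1).filter (fun x => decide (x ∉ v :: vs))
        = PySem.List.pyRange c v 1
          ++ (PySem.List.pyRange (v + 1) q 1).filter (fun x => decide (x ∉ vs)) := by
      rw [hsplit, List.filter_append, List.filter_cons]
      have hv : ¬ (v ∉ v :: vs) := by simp
      rw [if_neg (by simpa using hv)]
      congr 1
      · apply List.filter_eq_self.mpr
        intro a ha
        have hav : a < v := (PySem.List.mem_pyRange_one.mp ha).2
        simp only [decide_eq_true_eq, List.mem_cons, not_or]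
        exact ⟨by omega, fun hm => by have := hvvs a hm; omega⟩
      · apply List.filter_congr
        intro a ha
        have hav : v + 1 ≤ a := (PySem.List.mem_pyRange_one.mp ha).1
        have hne : a ≠ v := by omega
        simp [hne]
    have hT1all : (PySem.List.pyRange c v 1).filter (fun x => decide (x ∉ v :: vs))
        = PySem.List.pyRange c v 1 := by
      apply List.filter_eq_self.mpr
      intro a ha
      have hav : a < v := (PySem.List.mem_pyRange_one.mp ha).2
      simp only [decide_eq_true_eq, List.mem_cons, not_or]
      exact ⟨by omega, fun hm => by have := hvvs a hm; omega⟩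
    set T2 := ((PySem.List.pyRange (v + 1) q 1).filter (fun x => decide (x ∉ vs))).take
      (need - T1.length).toNat with hT2
    have htake : ((PySem.List.pyRange c q 1).filter (fun x => decide (x ∉ v :: vs))).take need.toNat
        = T1 ++ T2 := by
      rw [hfilt, List.take_append]
      have hlen : need.toNat - (PySem.List.pyRange c v 1).length
          = (need - (T1.length : Int)).toNat := by
        have hT1l : T1.length = min need.toNat (PySem.List.pyRange c v 1).length := by
          rw [hT1, List.length_take]
        omega
      rw [hlen]
    -- membership bounds
    have hT1mem : ∀ x ∈ T1, c ≤ x ∧ x < v := by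
      intro x hx
      have := List.take_subset _ _ hx
      exact ⟨(PySem.List.mem_pyRange_one.mp this).1, (PySem.List.mem_pyRange_one.mp this).2⟩
    have hWmem : ∀ x ∈ pvWalk q vs (v + 1) (need - T1.length), v < x := by
      intro x hx
      rcases List.mem_append.mp (ihp.mem_iff.mp hx) with h | h
      · exact hvvs x h
      · have := List.take_subset _ _ h
        have := (PySem.List.mem_pyRange_one.mp (List.mem_filter.mp this).1).1
        omega
    constructor
    · -- permutation
      rw [hg1, hg2, htake]
      refine (List.Perm.append_left T1 (List.Perm.cons v ihp)).trans ?_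
      refine List.perm_append_comm.trans ?_
      simp only [List.cons_append, List.append_assoc]
      exact List.Perm.cons v (List.Perm.append_left vs List.perm_append_comm)
    · -- sortedness
      rw [hg1, hg2]
      rw [List.pairwise_append]
      refine ⟨(hT1 ▸ (PySem.List.pairwise_lt_pyRange_one c v).sublist (List.take_sublist _ _)).imp id,
        ?_, ?_⟩
      · rw [List.pairwise_cons]
        exact ⟨hWmem, ihs⟩
      · intro a ha b hbm
        have h1 := (hT1mem a ha).2
        rcases List.mem_cons.mp hbm with rfl | hbm
        · omega
        · have := hWmem b hbm; omega

-- remap bounds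
lemma remap_bounds_pos (q r : Int) (hq : 2 ≤ q) : 1 ≤ pvRemap q r ∧ pvRemap q r < q := by
  unfold pvRemap
  have h1 := PySem.Int.mod_nonneg (a := q - r) (b := q) (by omega)
  have h2 := PySem.Int.mod_lt (a := q - r) (b := q) (by omega)
  by_cases h0 : PySem.Int.mod (q - r) q = 0 <;> simp [h0] <;> omega

lemma remap_lb_le_one (q r : Int) (hq : q ≤ 1) (hq0 : q ≠ 0) : q ≤ pvRemap q r + 1 := by
  unfold pvRemap
  by_cases h1 : q = 1
  · subst h1
    by_cases h0 : PySem.Int.mod (1 - r) 1 = 0 <;> simp [h0] <;> omega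
  · have hneg : q < 0 := by omega
    have := PySem.Int.mod_neg_bounds (a := q - r) (b := q) hneg
    by_cases h0 : PySem.Int.mod (q - r) q = 0 <;> simp [h0] <;> omega

lemma set_card_le (q : Int) (R : List Int) : (pvS q R).length ≤ R.length := by
  have h := (List.subperm_of_subset (PySem.Set.nodup_ofList (R.map (pvRemap q)))
    (fun x hx => (PySem.Set.mem_ofList _ _).mp hx)).length_le
  simpa using h

lemma B_char (q : Int) (R : List Int) (hq : q ≠ 0) :
    mirror_residues_alt q R = PySem.List.sorted (pvM q R) (fun x => x) false := by
  unfold mirror_residues_alt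
  simp only []
  rw [show (fun r => let m := PySem.Int.mod (q - r) q; if m = 0 then q - 1 else m)
      = pvRemap q from rfl]
  rw [dedup_eq_sorted_set q R]
  set u := PySem.List.sorted (pvS q R) (fun x => x) false with hu
  have hulen : u.length = (pvS q R).length := PySem.List.length_sorted _ _ _
  have hreslen : (PySem.List.sorted (R.map (pvRemap q)) (fun x => x) false).length = R.length := by
    rw [PySem.List.length_sorted]; simp
  rw [hreslen, hulen]
  have huperm : u.Perm (pvS q R) := PySem.List.sorted_perm _ _ _
  have hunodup : u.Nodup := huperm.nodup_iff.mpr (PySem.Set.nodup_ofList _)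
  have hupair : u.Pairwise (· < ·) :=
    pairwise_lt_of_le_nodup u (PySem.List.sorted_pairwise _ _) hunodup
  have humem : ∀ v, v ∈ u ↔ v ∈ pvS q R := fun v => huperm.mem_iff
  have hneed : (0 : Int) ≤ (R.length : Int) - ((pvS q R).length : Int) := by
    have := set_card_le q R; omega
  rcases (by omega : q ≤ 1 ∨ 2 ≤ q) with hle | hgt
  · -- q ≤ 1 (and q ≠ 0): range(1, q) is empty, the walk returns u, and pvM = pvS
    have hub : ∀ v ∈ u, q ≤ v + 1 := by
      intro v hv
      obtain ⟨r, _, rfl⟩ := List.mem_map.mp ((PySem.Set.mem_ofList _ _).mp ((humem v).mp hv))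
      exact remap_lb_le_one q r hle hq
    rw [walk_triv q u 1 _ hub (by omega)]
    have hM : pvM q R = pvS q R := by
      unfold pvM
      rw [PySem.List.pyRange_one_eq_nil (by omega)]
      simp
    rw [hM, hu]
  · -- 2 ≤ q
    have hub : ∀ v ∈ u, 1 ≤ v ∧ v < q := by
      intro v hv
      obtain ⟨r, _, rfl⟩ := List.mem_map.mp ((PySem.Set.mem_ofList _ _).mp ((humem v).mp hv))
      exact remap_bounds_pos q r (by omega)
    obtain ⟨hperm, hpair⟩ := walk_spec q u 1 _ hupair hub hneed
    refine (PySem.List.sorted_eq_of_perm_of_pairwise_lt _ _ _ ?_ hpair).symm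
    refine hperm.trans ?_
    unfold pvM
    refine List.Perm.append huperm ?_
    have hfc : (PySem.List.pyRange 1 q 1).filter (fun x => decide (x ∉ u))
        = (PySem.List.pyRange 1 q 1).filter (fun c => !PySem.Set.contains (pvS q R) c) := by
      apply List.filter_congr
      intro x _
      rw [PySem.Set.contains_eq_decide]
      simp [humem x]
    rw [hfc]

-- ===== VERDICT (by name: the statement is the Claim_ definition above) =====
theorem mirror_residues_spec : Claim_equal_mirror_residues := by
  intro q R _ hq
  unfold Spec_mirror_residues
  by_cases h0 : q = 0
  · rcases hq with h | h
    · exact absurd h0 h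
    · subst h0; subst h
      have hA : mirror_residues 0 [] = [] := rfl
      have hB : mirror_residues_alt 0 [] = [] := by
        unfold mirror_residues_alt
        simp only [List.map_nil]
        rw [show PySem.List.sorted ([] : List Int) (fun x => x) false = [] from rfl]
        simp only [List.foldl_nil, List.length_nil]
        rw [pvWalk, gap_empty 0 1 _ (by omega)]
      rw [hA, hB]
  · exact (A_char q R h0).trans (B_char q R h0).symm
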